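-- pv_equiv track=rewrite | github.com/Abhi-she-k/PythonProblems | labs109Solutions.py | reverse_110
-- ===== SOURCE A (Python) =====
-- def reverse_110(current):
--     n = len(current)
--
--     # Rule 110 lookup table: maps (left, center, right) to next state
--     rule_110 = {
--         (0, 0, 0): 0,
--         (0, 0, 1): 1,
--         (0, 1, 0): 1,
--         (0, 1, 1): 1,
--         (1, 0, 0): 0,
--         (1, 0, 1): 1,
--         (1, 1, 0): 1,
--         (1, 1, 1): 0,
--     }
--
--     def apply_rule_110(prev):
--         """Apply Rule 110 to get next state"""
--         next_state = []
--         for i in range(n):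
--             left = prev[(i - 1) % n]
--             center = prev[i]
--             right = prev[(i + 1) % n]
--             next_state.append(rule_110[(left, center, right)])
--         return next_state
--
--     def backtrack(prev, pos):
--         """Build previous state position by position"""
--         # Base case: filled all positions
--         if pos == n:
--             # Check if applying Rule 110 gives us current state
--             if apply_rule_110(prev) == current:
--                 return prev[:]
--             else:
--                 return None
--
--         # Try both 0 and 1 for this position
--         for value in [0, 1]:
--             prev.append(value)
--
--             # Check if this is still valid so far
--             # We can check positions that have enough neighbors filled in
--             if pos >= 2:
--
--                 # Check position pos-1
--                 check_pos = pos - 1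
--                 center = prev[check_pos]
--
--                 # FIX 2: We don't need to use modulo n here since pos < n when we are checking and
--                 # The script ends when pos == n. So we don't need to wrap around the previous list object.
--                 left = prev[check_pos - 1]
--                 # FIX 1: Here check_pos + 1 with never be < pos since check_pos = pos - 1 and
--                 # check_pos + 1 = pos. Therefore, this condition is always false, and right is
--                 # always none, therefore, we never check rule_110 and never prune invalid branches.
--                 right = prev[check_pos + 1]
--
--                 if right is not None:
--                     expected = rule_110[(left, center, right)]
--                     if expected != current[check_pos]:
--                         prev.pop()
--                         continue
--
--             result = backtrack(prev, pos + 1)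
--             if result is not None:
--                 return result
--
--             prev.pop()
--
--         return None
--
--     return backtrack([], 0)
-- ===== SOURCE B (Python) =====
-- def reverse_110(current):
--     n = len(current)
--
--     rule_110 = {
--         (0, 0, 0): 0,
--         (0, 0, 1): 1,
--         (0, 1, 0): 1,
--         (0, 1, 1): 1,
--         (1, 0, 0): 0,
--         (1, 0, 1): 1,
--         (1, 1, 0): 1,
--         (1, 1, 1): 0,
--     }
--
--     if n == 0:
--         return []
--     if n == 1:
--         # a single cell is its own left and right neighbour; 000 -> 0 and 111 -> 0
--         return [0] if current[0] == 0 else None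
--
--     # n >= 2: transfer DP over adjacent pairs (prev[i-1], prev[i]) of the
--     # previous state.  Fix (prev[0], prev[1]) = (a, b) in lexicographic order,
--     # compute backward feasibility sets, then extend greedily (smallest cell
--     # first); the first (a, b) that is feasible yields the lexicographically
--     # smallest predecessor.
--     mid = current[1:n - 1]          # the constraints with no wrap-around
--     for a in (0, 1):
--         for b in (0, 1):
--             # last = pairs (prev[n-2], prev[n-1]) satisfying both wrap-around
--             # constraints (positions n-1 and 0) given prev[0] = a, prev[1] = b
--             last = {(l, c) for l in (0, 1) for c in (0, 1)
--                     if rule_110[(l, c, a)] == current[n - 1]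
--                     and rule_110[(c, a, b)] == current[0]}
--             # ok[j] = pairs (prev[j], prev[j+1]) extendable to the end, j = 0..n-2
--             ok = [last]
--             for t in reversed(mid):
--                 nxt = ok[-1]
--                 ok.append({(l, c) for l in (0, 1) for c in (0, 1)
--                            if any(rule_110[(l, c, r)] == t and (c, r) in nxt
--                                   for r in (0, 1))})
--             ok.reverse()
--             if (a, b) in ok[0]:
--                 p = [a, b]
--                 l, c = a, b
--                 for t, nxt in zip(mid, ok[1:]):
--                     for r in (0, 1):
--                         if rule_110[(l, c, r)] == t and (c, r) in nxt:
--                             p.append(r)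
--                             l, c = c, r
--                             break
--                 return p
--     return None
-- ===== Notes on version B (the rewrite author's own statement) =====
-- stated objective: alternative
-- what changed: A's depth-first backtracking over candidate predecessor states is replaced by a transfer DP over adjacent cell pairs: for each of the four start pairs (prev[0],prev[1]) in lexicographic order, backward feasibility sets of pairs are computed around the ring and the answer is read off by a greedy forward pass; B does a fixed number of passes over the list, while A's recursive search can revisit exponentially many branches on adversarial inputs but exits very quickly on typical ones.
import Mathlib
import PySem

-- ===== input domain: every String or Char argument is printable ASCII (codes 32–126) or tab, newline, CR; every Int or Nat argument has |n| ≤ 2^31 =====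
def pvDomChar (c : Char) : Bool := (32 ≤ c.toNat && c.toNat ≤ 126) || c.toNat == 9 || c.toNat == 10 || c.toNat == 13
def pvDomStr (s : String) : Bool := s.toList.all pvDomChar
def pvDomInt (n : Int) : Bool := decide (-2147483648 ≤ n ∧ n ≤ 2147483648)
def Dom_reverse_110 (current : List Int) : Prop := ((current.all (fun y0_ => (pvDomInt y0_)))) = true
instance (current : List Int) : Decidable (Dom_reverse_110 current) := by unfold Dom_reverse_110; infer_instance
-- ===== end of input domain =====

-- B replaces A's depth-first backtracking search by a transfer DP over adjacent cell pairs
-- (backward feasibility sets around the ring, then a greedy lexicographic forward pass).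

-- ===== PORT A =====

-- the rule_110 lookup table (shared verbatim by both Python versions)
def rule110Table : PySem.Dict (Int × Int × Int) Int :=
  PySem.Dict.ofList
    [((0, 0, 0), 0), ((0, 0, 1), 1), ((0, 1, 0), 1), ((0, 1, 1), 1),
     ((1, 0, 0), 0), ((1, 0, 1), 1), ((1, 1, 0), 1), ((1, 1, 1), 0)]

-- rule_110[(l, c, r)]; every lookup either program performs has l,c,r ∈ {0,1}, so the
-- KeyError case is unreachable and the `.getD 0` default is never used.
def ruleGet (l c r : Int) : Int := (rule110Table.get? (l, c, r)).getD 0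

-- apply_rule_110 (closure over `current` via n = len(current)); prev always has length n,
-- so the `.getD 0` after pyGet? (an index (i±1) % n or i, all in range) is never used.
def applyRule110 (current prev : List Int) : List Int :=
  let n : Int := current.length
  (PySem.List.pyRange 0 n 1).foldl
    (fun next_state i =>
      let left := (PySem.List.pyGet? prev (PySem.Int.mod (i - 1) n)).getD 0
      let center := (PySem.List.pyGet? prev i).getD 0
      let right := (PySem.List.pyGet? prev (PySem.Int.mod (i + 1) n)).getD 0
      next_state ++ [ruleGet left center right]) []

-- backtrack(prev, pos); the recursion is driven by fuel = n - pos (the Python call depth)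
def backtrack110 (current : List Int) : Nat → List Int → Int → Option (List Int)
  | 0, prev, _pos =>
      if applyRule110 current prev = current then some prev else none
  | fuel + 1, prev, pos =>
      let step : Int → Option (List Int) := fun value =>
        let q := prev ++ [value]
        let pruned : Bool :=
          if 2 ≤ pos then
            let check_pos := pos - 1
            let center := (PySem.List.pyGet? q check_pos).getD 0
            let left := (PySem.List.pyGet? q (check_pos - 1)).getD 0
            match PySem.List.pyGet? q (check_pos + 1) with
            | some right =>
                decide (ruleGet left center right ≠ (PySem.List.pyGet? current check_pos).getD 0)
            | none => false
          else false
        if pruned then none else backtrack110 current fuel q (pos + 1)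
      (step 0).or (step 1)

def reverse_110 (current : List Int) : Option (List Int) :=
  backtrack110 current current.length [] 0

-- ===== PORT B =====

-- the iteration order of `for l in (0,1) for c in (0,1)` in B's set comprehensions
def pairs01 : List (Int × Int) := [(0, 0), (0, 1), (1, 0), (1, 1)]

-- {(l,c) ... if rule_110[(l,c,a)] == current[n-1] and rule_110[(c,a,b)] == current[0]}
def lastSet (current : List Int) (n a b : Int) : PySem.Set (Int × Int) :=
  PySem.Set.ofList (pairs01.filter (fun lc =>
    decide (ruleGet lc.1 lc.2 a = (PySem.List.pyGet? current (n - 1)).getD 0) &&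
    decide (ruleGet lc.2 a b = (PySem.List.pyGet? current 0).getD 0)))

-- {(l,c) ... if any(rule_110[(l,c,r)] == t and (c,r) in nxt for r in (0,1))}
def stepSet (t : Int) (nxt : PySem.Set (Int × Int)) : PySem.Set (Int × Int) :=
  PySem.Set.ofList (pairs01.filter (fun lc =>
    ([(0 : Int), 1]).any (fun r =>
      decide (ruleGet lc.1 lc.2 r = t) && PySem.Set.contains nxt (lc.2, r))))

-- one iteration of the `for a ...: for b ...:` body for a fixed start pair (a, b)
def tryStart (current : List Int) (n : Int) (mid : List Int) (a b : Int) : Option (List Int) :=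
  let last := lastSet current n a b
  let ok := mid.reverse.foldl
    (fun ok t => ok ++ [stepSet t ((PySem.List.pyGet? ok (-1)).getD PySem.Set.empty)]) [last]
  let ok := ok.reverse
  if PySem.Set.contains (ok.headD PySem.Set.empty) (a, b) then
    let res := (mid.zip ok.tail).foldl
      (fun (st : List Int × Int × Int) tn =>
        match ([(0 : Int), 1]).find? (fun r =>
            decide (ruleGet st.2.1 st.2.2 r = tn.1) && PySem.Set.contains tn.2 (st.2.2, r)) with
        | some r => (st.1 ++ [r], st.2.2, r)
        | none => st) ([a, b], a, b)
    some res.1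
  else none

def reverse_110_alt (current : List Int) : Option (List Int) :=
  let n : Int := current.length
  if current.length = 0 then some []
  else if current.length = 1 then
    (if (PySem.List.pyGet? current 0).getD 0 = 0 then some [0] else none)
  else
    let mid := PySem.List.slice current (some 1) (some (n - 1))
    ((tryStart current n mid 0 0).or
      ((tryStart current n mid 0 1).or
        ((tryStart current n mid 1 0).or (tryStart current n mid 1 1))))

-- ===== PRECONDITION & SPEC =====
def Spec_reverse_110 (current : List Int) (out : Option (List Int)) : Prop := out = reverse_110_alt current
instance (current : List Int) (out : Option (List Int)) : Decidable (Spec_reverse_110 current out) := by unfold Spec_reverse_110; infer_instance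

-- ===== CLAIM (what is proved, stated in full; the proofs are below) =====
def Claim_equal_reverse_110 : Prop := ∀ (current : List Int), Dom_reverse_110 current → Spec_reverse_110 current (reverse_110 current)

-- ===== LEMMAS AND PROOFS =====

-- all binary suffixes of length k, in lexicographic order
def allBin : Nat → List (List Int)
  | 0 => [[]]
  | k + 1 => (allBin k).map (fun s => 0 :: s) ++ (allBin k).map (fun s => 1 :: s)

-- the interior / wrap-around constraint chain: goodChain ts (l, c) s says the suffix s extends
-- the pair (l, c) consistently through the interior targets ts and the two wrap constraints
def endOK (current : List Int) (a b l c : Int) : Bool :=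
  decide (ruleGet l c a = (PySem.List.pyGet? current ((current.length : Int) - 1)).getD 0) &&
  decide (ruleGet c a b = (PySem.List.pyGet? current 0).getD 0)

def goodChain (current : List Int) (a b : Int) : List Int → Int → Int → List Int → Bool
  | [], l, c, [] => endOK current a b l c
  | t :: ts, l, c, r :: s => decide (ruleGet l c r = t) && goodChain current a b ts c r s
  | _, _, _, _ => false

-- lexicographically first consistent suffix (the mathematical core both programs compute)
def firstSuffix (current : List Int) (a b : Int) : List Int → Int → Int → Option (List Int)
  | [], l, c => if endOK current a b l c = true then some [] else none
  | t :: ts, l, c =>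
      ((if ruleGet l c 0 = t then (firstSuffix current a b ts c 0).map (fun s => 0 :: s) else none).or
        (if ruleGet l c 1 = t then (firstSuffix current a b ts c 1).map (fun s => 1 :: s) else none))

def okChain (current : List Int) (a b : Int) : List Int → PySem.Set (Int × Int)
  | [] => lastSet current (current.length : Int) a b
  | t :: ts => stepSet t (okChain current a b ts)

def validB (current p : List Int) : Bool := decide (applyRule110 current p = current)


-- one cell of apply_rule_110's output
def elt (current p : List Int) (i : Int) : Int :=
  let n : Int := current.length
  ruleGet ((PySem.List.pyGet? p (PySem.Int.mod (i - 1) n)).getD 0)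
    ((PySem.List.pyGet? p i).getD 0)
    ((PySem.List.pyGet? p (PySem.Int.mod (i + 1) n)).getD 0)

theorem applyRule110_eq_map (current p : List Int) :
    applyRule110 current p
      = (List.range current.length).map (fun (k : Nat) => elt current p (k : Int)) := by
  simp only [applyRule110, elt]
  rw [PySem.List.pyRange_zero_nat, PySem.List.foldl_append_singleton_eq_map]
  simp [List.map_map, Function.comp_def]

theorem getD_cast (p : List Int) (k : Nat) :
    (PySem.List.pyGet? p (k : Int)).getD 0 = p.getD k 0 := by
  rw [PySem.List.pyGet?_natCast]
  simp [List.getD]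

theorem elt_interior (current p : List Int) (k : Nat)
    (hk : 1 ≤ k) (hk2 : k + 1 < current.length) :
    elt current p (k : Int) =
      ruleGet (p.getD (k - 1) 0) (p.getD k 0) (p.getD (k + 1) 0) := by
  simp only [elt]
  have hn : (0 : Int) < current.length := by exact_mod_cast Nat.lt_of_le_of_lt (Nat.zero_le _) hk2
  rw [PySem.Int.mod_eq_emod_of_pos hn, PySem.Int.mod_eq_emod_of_pos hn]
  have hk2' : (k : Int) + 1 < (current.length : Int) := by exact_mod_cast hk2
  have h1 : ((k : Int) - 1) % (current.length : Int) = ((k - 1 : Nat) : Int) := by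
    rw [Int.emod_eq_of_lt (by omega) (by omega)]; omega
  have h2 : ((k : Int) + 1) % (current.length : Int) = ((k + 1 : Nat) : Int) := by
    rw [Int.emod_eq_of_lt (by omega) (by omega)]; omega
  rw [h1, h2, getD_cast, getD_cast, getD_cast]

theorem elt_zero (current p : List Int) (h2 : 2 ≤ current.length) :
    elt current p 0 =
      ruleGet (p.getD (current.length - 1) 0) (p.getD 0 0) (p.getD 1 0) := by
  simp only [elt]
  have hn : (2 : Int) ≤ current.length := by exact_mod_cast h2
  rw [PySem.Int.mod_eq_emod_of_pos (by omega), PySem.Int.mod_eq_emod_of_pos (by omega)]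
  have h1 : ((0 : Int) - 1) % (current.length : Int) = ((current.length - 1 : Nat) : Int) := by
    have e : ((0 : Int) - 1) = ((current.length : Int) - 1) + (current.length : Int) * (-1) := by
      ring
    rw [e, Int.add_mul_emod_self_left, Int.emod_eq_of_lt (by omega) (by omega)]; omega
  have h2' : ((0 : Int) + 1) % (current.length : Int) = ((1 : Nat) : Int) := by
    rw [Int.emod_eq_of_lt (by omega) (by omega)]; omega
  rw [h1, h2', getD_cast, getD_cast]
  have h0 : (PySem.List.pyGet? p 0).getD 0 = p.getD 0 0 := by
    have := getD_cast p 0; simpa using this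
  rw [h0]

theorem elt_last (current p : List Int) (h2 : 2 ≤ current.length) :
    elt current p ((current.length - 1 : Nat) : Int) =
      ruleGet (p.getD (current.length - 2) 0) (p.getD (current.length - 1) 0) (p.getD 0 0) := by
  simp only [elt]
  have hn : (2 : Int) ≤ current.length := by exact_mod_cast h2
  have hc : ((current.length - 1 : Nat) : Int) = (current.length : Int) - 1 := by omega
  rw [PySem.Int.mod_eq_emod_of_pos (by omega), PySem.Int.mod_eq_emod_of_pos (by omega), hc]
  have h1 : ((current.length : Int) - 1 - 1) % (current.length : Int)
      = ((current.length - 2 : Nat) : Int) := by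
    rw [Int.emod_eq_of_lt (by omega) (by omega)]; omega
  have h2' : ((current.length : Int) - 1 + 1) % (current.length : Int) = ((0 : Nat) : Int) := by
    simp
  rw [h1, h2', ← hc, getD_cast, getD_cast, getD_cast]

theorem applyRule110_eq_iff (current p : List Int) :
    applyRule110 current p = current
      ↔ ∀ k < current.length, elt current p (k : Int) = current.getD k 0 := by
  rw [applyRule110_eq_map]
  constructor
  · intro h k hk
    have := congrArg (fun l => l.getD k 0) h
    simpa [List.getD_eq_getElem?_getD, List.getElem?_map, List.getElem?_range hk] using this
  · intro h
    apply List.ext_getElem (by simp)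
    intro i h1 h2
    have := h i (by simpa using h2)
    simpa [List.getD_eq_getElem?_getD, List.getElem?_eq_getElem h2] using this

theorem mem_allBin {k : Nat} {s : List Int} (h : s ∈ allBin k) : s.length = k := by
  induction k generalizing s with
  | zero => simp [allBin] at h; simp [h]
  | succ k ih =>
    simp only [allBin, List.mem_append, List.mem_map] at h
    rcases h with ⟨t, ht, rfl⟩ | ⟨t, ht, rfl⟩ <;> simp [ih ht]

theorem prune_sound (current prev : List Int) (v : Int) (s : List Int)
    (h2 : 2 ≤ prev.length) (hfit : prev.length + 1 + s.length = current.length)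
    (hbad : ruleGet ((prev ++ [v]).getD (prev.length - 2) 0)
        ((prev ++ [v]).getD (prev.length - 1) 0) v ≠ current.getD (prev.length - 1) 0) :
    validB current (prev ++ v :: s) = false := by
  simp only [validB, decide_eq_false_iff_not]
  intro hEq
  rw [applyRule110_eq_iff] at hEq
  set p := prev ++ v :: s with hp
  have hplen : p.length = current.length := by simp [hp]; omega
  have hk := hEq (prev.length - 1) (by omega)
  rw [elt_interior current p (prev.length - 1) (by omega) (by omega)] at hk
  apply hbad
  have e1 : p.getD (prev.length - 1 - 1) 0 = (prev ++ [v]).getD (prev.length - 2) 0 := by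
    rw [hp, List.getD_append _ _ _ _ (by omega), List.getD_append _ _ _ _ (by omega)]
    rfl
  have e2 : p.getD (prev.length - 1) 0 = (prev ++ [v]).getD (prev.length - 1) 0 := by
    rw [hp, List.getD_append _ _ _ _ (by omega), List.getD_append _ _ _ _ (by omega)]
  have e3 : p.getD (prev.length - 1 + 1) 0 = v := by
    have : prev.length - 1 + 1 = prev.length := by omega
    rw [hp, this]
    rw [List.getD_eq_getElem?_getD, List.getElem?_append_right (by omega)]
    simp
  rw [e1, e2, e3] at hk
  exact hk

theorem backtrack_eq (current : List Int) (fuel : Nat) (prev : List Int) (pos : Int)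
    (hpos : pos = (prev.length : Int)) (hlen : prev.length + fuel = current.length) :
    backtrack110 current fuel prev pos
      = ((allBin fuel).find? (fun s => validB current (prev ++ s))).map (fun s => prev ++ s) := by
  induction fuel generalizing prev pos with
  | zero =>
    simp only [backtrack110, allBin, List.find?]
    cases h : validB current (prev ++ []) with
    | true =>
      simp only [h]
      simp only [validB, List.append_nil, decide_eq_true_eq] at h
      simp [h]
    | false =>
      simp only [h]
      simp only [validB, List.append_nil, decide_eq_false_iff_not] at h
      simp [h]
  | succ fuel ih =>
    have hstep : ∀ v : Int,
        (let q := prev ++ [v]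
         let pruned : Bool :=
           if 2 ≤ pos then
             let check_pos := pos - 1
             let center := (PySem.List.pyGet? q check_pos).getD 0
             let left := (PySem.List.pyGet? q (check_pos - 1)).getD 0
             match PySem.List.pyGet? q (check_pos + 1) with
             | some right =>
                 decide (ruleGet left center right ≠ (PySem.List.pyGet? current check_pos).getD 0)
             | none => false
           else false
         if pruned then none else backtrack110 current fuel q (pos + 1))
        = ((allBin fuel).find? (fun s => validB current (prev ++ v :: s))).map
            (fun s => prev ++ v :: s) := by
      intro v
      simp only []
      have hq : ∀ s : List Int, prev ++ v :: s = (prev ++ [v]) ++ s := by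
        intro s; simp
      by_cases hpr : (2 : Int) ≤ pos
      · -- the pruning test is live
        have hl2 : 2 ≤ prev.length := by omega
        have hr : PySem.List.pyGet? (prev ++ [v]) (pos - 1 + 1) = some v := by
          have : pos - 1 + 1 = ((prev.length : Nat) : Int) := by omega
          rw [this, PySem.List.pyGet?_append_length]
        rw [hr]
        have hc : (PySem.List.pyGet? (prev ++ [v]) (pos - 1)).getD 0
            = (prev ++ [v]).getD (prev.length - 1) 0 := by
          have : pos - 1 = ((prev.length - 1 : Nat) : Int) := by omega
          rw [this, getD_cast]
        have hlft : (PySem.List.pyGet? (prev ++ [v]) (pos - 1 - 1)).getD 0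
            = (prev ++ [v]).getD (prev.length - 2) 0 := by
          have : pos - 1 - 1 = ((prev.length - 2 : Nat) : Int) := by omega
          rw [this, getD_cast]
        have hcur : (PySem.List.pyGet? current (pos - 1)).getD 0
            = current.getD (prev.length - 1) 0 := by
          have : pos - 1 = ((prev.length - 1 : Nat) : Int) := by omega
          rw [this, getD_cast]
        rw [if_pos hpr, hc, hlft, hcur]
        by_cases hbad : ruleGet ((prev ++ [v]).getD (prev.length - 2) 0)
            ((prev ++ [v]).getD (prev.length - 1) 0) v ≠ current.getD (prev.length - 1) 0
        · -- pruned: the whole subtree is invalid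
          rw [if_pos (by simpa using hbad)]
          have hnone : (allBin fuel).find? (fun s => validB current (prev ++ v :: s)) = none := by
            apply List.find?_eq_none.2
            intro s hs
            simp only [Bool.not_eq_true]
            exact prune_sound current prev v s hl2 (by have := mem_allBin hs; omega) hbad
          rw [hnone]; rfl
        · rw [if_neg (by simpa using hbad)]
          rw [ih (prev ++ [v]) (pos + 1)
            (by simp only [List.length_append, List.length_cons, List.length_nil]; push_cast; omega)
            (by simp only [List.length_append, List.length_cons, List.length_nil]; omega)]
          simp only [List.append_assoc, List.singleton_append]
      · rw [if_neg hpr, if_neg (by simp)]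
        rw [ih (prev ++ [v]) (pos + 1)
          (by simp only [List.length_append, List.length_cons, List.length_nil]; push_cast; omega)
          (by simp only [List.length_append, List.length_cons, List.length_nil]; omega)]
        simp only [List.append_assoc, List.singleton_append]
    calc backtrack110 current (fuel + 1) prev pos
        = _ := rfl
      _ = ((allBin (fuel + 1)).find? (fun s => validB current (prev ++ s))).map
            (fun s => prev ++ s) := by
          rw [show allBin (fuel + 1)
              = (allBin fuel).map (fun s => 0 :: s) ++ (allBin fuel).map (fun s => 1 :: s) from rfl]
          rw [List.find?_append, List.find?_map, List.find?_map]
          simp only [backtrack110]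
          rw [hstep 0, hstep 1]
          simp only [Function.comp_def]
          cases hf0 : (allBin fuel).find? (fun x => validB current (prev ++ 0 :: x)) <;>
            cases hf1 : (allBin fuel).find? (fun x => validB current (prev ++ 1 :: x)) <;>
            simp [hf0, hf1, Option.or]

theorem getD_pyGet?_zero (l : List Int) : (PySem.List.pyGet? l 0).getD 0 = l.getD 0 0 := by
  have := getD_cast l 0; simpa using this

theorem goodChain_iff (current : List Int) (a b : Int) (ts : List Int) (l c : Int) (s : List Int)
    (h : ts.length = s.length) :
    goodChain current a b ts l c s = true ↔
      ((∀ j < ts.length,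
          ruleGet ((l :: c :: s).getD j 0) ((l :: c :: s).getD (j + 1) 0)
              ((l :: c :: s).getD (j + 2) 0) = ts.getD j 0) ∧
        endOK current a b ((l :: c :: s).getD ts.length 0)
          ((l :: c :: s).getD (ts.length + 1) 0) = true) := by
  induction ts generalizing l c s with
  | nil =>
    have hs : s = [] := List.eq_nil_of_length_eq_zero h.symm
    subst hs
    simp [goodChain]
  | cons t ts ih =>
    cases s with
    | nil => simp at h
    | cons r s =>
      have hlen : ts.length = s.length := by simpa using h
      rw [show goodChain current a b (t :: ts) l c (r :: s)
          = (decide (ruleGet l c r = t) && goodChain current a b ts c r s) from rfl]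
      rw [Bool.and_eq_true, decide_eq_true_eq, ih c r s hlen]
      constructor
      · rintro ⟨h0, hfam, hend⟩
        refine ⟨?_, ?_⟩
        · intro j hj
          cases j with
          | zero => simpa using h0
          | succ j =>
            have := hfam j (by simpa using hj)
            simpa using this
        · simpa using hend
      · rintro ⟨hfam, hend⟩
        refine ⟨?_, ?_, ?_⟩
        · simpa using hfam 0 (by simp)
        · intro j hj
          have := hfam (j + 1) (by simpa using hj)
          simpa using this
        · simpa using hend

theorem getD_mid (current : List Int) (j : Nat) (hj : j < current.length - 2) :
    ((current.drop 1).take (current.length - 2)).getD j 0 = current.getD (j + 1) 0 := by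
  rw [List.getD_eq_getElem?_getD, List.getD_eq_getElem?_getD,
    List.getElem?_take_of_lt hj, List.getElem?_drop]
  rw [Nat.add_comm 1 j]

theorem length_mid (current : List Int) (h2 : 2 ≤ current.length) :
    ((current.drop 1).take (current.length - 2)).length = current.length - 2 := by
  simp
  omega

theorem valid_iff_goodChain (current : List Int) (a b : Int) (s : List Int)
    (h2 : 2 ≤ current.length) (hs : s.length = current.length - 2) :
    validB current (a :: b :: s)
      = goodChain current a b ((current.drop 1).take (current.length - 2)) a b s := by
  set p := a :: b :: s with hp
  have hplen : p.length = current.length := by simp [hp]; omega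
  rw [Bool.eq_iff_iff, show validB current p = true ↔ applyRule110 current p = current from by
    simp [validB]]
  rw [applyRule110_eq_iff]
  rw [goodChain_iff current a b _ a b s (by rw [length_mid current h2]; omega)]
  rw [length_mid current h2]
  have hgd : ∀ j, (a :: b :: s).getD j 0 = p.getD j 0 := fun _ => rfl
  have hend : endOK current a b (p.getD (current.length - 2) 0) (p.getD (current.length - 1) 0)
      = true ↔
      (ruleGet (p.getD (current.length - 2) 0) (p.getD (current.length - 1) 0) a
          = current.getD (current.length - 1) 0 ∧
        ruleGet (p.getD (current.length - 1) 0) a b = current.getD 0 0) := by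
    simp only [endOK, Bool.and_eq_true, decide_eq_true_eq]
    rw [show ((current.length : Int) - 1) = ((current.length - 1 : Nat) : Int) from by omega,
      getD_cast, getD_pyGet?_zero]
  have hs2 : current.length - 2 + 1 = current.length - 1 := by omega
  constructor
  · intro h
    refine ⟨?_, ?_⟩
    · intro j hj
      have := h (j + 1) (by omega)
      rw [elt_interior current p (j + 1) (by omega) (by omega)] at this
      rw [getD_mid current j hj]
      simpa using this
    · rw [hgd, hgd, hs2, hend]
      have hz := h 0 (by omega)
      rw [Nat.cast_zero, elt_zero current p h2] at hz
      have hlast := h (current.length - 1) (by omega)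
      rw [elt_last current p h2] at hlast
      have hpa : p.getD 0 0 = a := rfl
      have hpb : p.getD 1 0 = b := rfl
      rw [hpa, hpb] at hz
      exact ⟨hlast, hz⟩
  · rintro ⟨hfam, hendh⟩
    rw [hgd, hgd, hs2, hend] at hendh
    intro k hk
    by_cases hk0 : k = 0
    · subst hk0
      rw [Nat.cast_zero, elt_zero current p h2]
      have hpa : p.getD 0 0 = a := rfl
      have hpb : p.getD 1 0 = b := rfl
      rw [hpa, hpb]
      exact hendh.2
    · by_cases hkl : k = current.length - 1
      · subst hkl
        rw [elt_last current p h2]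
        exact hendh.1
      · have hk1 : 1 ≤ k := by omega
        have hk2 : k + 1 < current.length := by omega
        rw [elt_interior current p k hk1 hk2]
        have := hfam (k - 1) (by omega)
        rw [getD_mid current (k - 1) (by omega)] at this
        have e1 : k - 1 + 1 = k := by omega
        have e2 : k - 1 + 2 = k + 1 := by omega
        rw [e1, e2] at this
        exact this

theorem find?_goodChain (current : List Int) (a b : Int) (ts : List Int) (l c : Int) :
    (allBin ts.length).find? (fun s => goodChain current a b ts l c s)
      = firstSuffix current a b ts l c := by
  induction ts generalizing l c with
  | nil =>
    cases h : endOK current a b l c <;>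
      simp [allBin, List.find?, goodChain, h, firstSuffix]
  | cons t ts ih =>
    rw [show (t :: ts).length = ts.length + 1 from rfl,
      show allBin (ts.length + 1)
        = (allBin ts.length).map (fun s => 0 :: s) ++ (allBin ts.length).map (fun s => 1 :: s)
        from rfl,
      List.find?_append, List.find?_map, List.find?_map]
    simp only [Function.comp_def]
    rw [show firstSuffix current a b (t :: ts) l c
      = ((if ruleGet l c 0 = t then (firstSuffix current a b ts c 0).map (fun s => 0 :: s)
            else none).or
          (if ruleGet l c 1 = t then (firstSuffix current a b ts c 1).map (fun s => 1 :: s)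
            else none)) from rfl]
    have hbranch : ∀ v : Int, ((allBin ts.length).find?
          (fun x => goodChain current a b (t :: ts) l c (v :: x))).map (fun s => v :: s)
        = (if ruleGet l c v = t then (firstSuffix current a b ts c v).map (fun s => v :: s)
            else none) := by
      intro v
      rw [show (fun x => goodChain current a b (t :: ts) l c (v :: x))
          = (fun x => decide (ruleGet l c v = t) && goodChain current a b ts c v x) from rfl]
      by_cases h : ruleGet l c v = t
      · rw [if_pos h]
        simp only [h, decide_true, Bool.true_and]
        rw [ih c v]
      · rw [if_neg h]
        simp only [decide_eq_true_eq, h, decide_false, Bool.false_and]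
        simp
    rw [hbranch 0, hbranch 1]

theorem mem_pairs01 (l c : Int) (hl : l = 0 ∨ l = 1) (hc : c = 0 ∨ c = 1) :
    (l, c) ∈ pairs01 := by
  rcases hl with rfl | rfl <;> rcases hc with rfl | rfl <;> simp [pairs01]

theorem mem_okChain (current : List Int) (a b : Int) (ts : List Int) (l c : Int)
    (hl : l = 0 ∨ l = 1) (hc : c = 0 ∨ c = 1) :
    PySem.Set.contains (okChain current a b ts) (l, c) = true
      ↔ firstSuffix current a b ts l c ≠ none := by
  induction ts generalizing l c with
  | nil =>
    rw [show okChain current a b [] = lastSet current (current.length : Int) a b from rfl]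
    rw [show firstSuffix current a b [] l c
      = (if endOK current a b l c = true then some [] else none) from rfl]
    unfold lastSet
    rw [PySem.Set.contains_iff, PySem.Set.mem_ofList, List.mem_filter]
    simp only [endOK, Bool.and_eq_true, decide_eq_true_eq]
    constructor
    · rintro ⟨-, h⟩
      simp [h.1, h.2]
    · intro h
      split_ifs at h with hok
    
      · simp only [endOK, Bool.and_eq_true, decide_eq_true_eq] at hok
        exact ⟨mem_pairs01 l c hl hc, hok⟩
      · exact absurd rfl h
  | cons t ts ih =>
    rw [show okChain current a b (t :: ts) = stepSet t (okChain current a b ts) from rfl]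
    unfold stepSet
    rw [PySem.Set.contains_iff, PySem.Set.mem_ofList, List.mem_filter]
    rw [show firstSuffix current a b (t :: ts) l c
      = ((if ruleGet l c 0 = t then (firstSuffix current a b ts c 0).map (fun s => 0 :: s)
            else none).or
          (if ruleGet l c 1 = t then (firstSuffix current a b ts c 1).map (fun s => 1 :: s)
            else none)) from rfl]
    rw [Ne, Option.or_eq_none_iff]
    have h0 := ih c 0 hc (Or.inl rfl)
    have h1 := ih c 1 hc (Or.inr rfl)
    constructor
    · rintro ⟨-, hany⟩
      simp only [List.any_eq_true, List.mem_cons, List.mem_singleton, Bool.and_eq_true,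
        decide_eq_true_eq] at hany
      obtain ⟨r, hr, hrule, hmem⟩ := hany
      intro hcon
      rcases hr with rfl | hr
      · rw [h0] at hmem
        rw [if_pos hrule] at hcon
        exact hmem (Option.map_eq_none_iff.mp hcon.1)
      · rcases hr with rfl | hfalse
        · rw [h1] at hmem
          rw [if_pos hrule] at hcon
          exact hmem (Option.map_eq_none_iff.mp hcon.2)
        · cases hfalse
    · intro h
      refine ⟨mem_pairs01 l c hl hc, ?_⟩
      simp only [List.any_eq_true, List.mem_cons, List.mem_singleton, Bool.and_eq_true,
        decide_eq_true_eq]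
      by_cases hr0 : ruleGet l c 0 = t ∧ firstSuffix current a b ts c 0 ≠ none
      · exact ⟨0, Or.inl rfl, hr0.1, h0.mpr hr0.2⟩
      · refine ⟨1, Or.inr (Or.inl rfl), ?_, ?_⟩
        · by_contra h1rule
          apply h
          constructor
          · by_cases hq : ruleGet l c 0 = t
            · rw [if_pos hq]
              rw [Option.map_eq_none_iff]
              by_contra hne
              exact hr0 ⟨hq, hne⟩
            · rw [if_neg hq]
          · rw [if_neg h1rule]
        · rw [h1]
          intro hnone1
          apply h
          constructor
          · by_cases hq : ruleGet l c 0 = t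
            · rw [if_pos hq, Option.map_eq_none_iff]
              by_contra hne
              exact hr0 ⟨hq, hne⟩
            · rw [if_neg hq]
          · by_cases hq : ruleGet l c 1 = t
            · rw [if_pos hq, Option.map_eq_none_iff]
              exact hnone1
            · rw [if_neg hq]

def okListF (current : List Int) (a b : Int) (ts : List Int) : List (PySem.Set (Int × Int)) :=
  ts.foldr (fun t ok => stepSet t (ok.headD PySem.Set.empty) :: ok)
    [lastSet current (current.length : Int) a b]

theorem okListF_cons (current : List Int) (a b t : Int) (ts : List Int) :
    okListF current a b (t :: ts)
      = stepSet t ((okListF current a b ts).headD PySem.Set.empty) :: okListF current a b ts := rfl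

theorem headD_okListF (current : List Int) (a b : Int) (ts : List Int) :
    (okListF current a b ts).headD PySem.Set.empty = okChain current a b ts := by
  induction ts with
  | nil => rfl
  | cons t ts ih =>
    rw [okListF_cons]
    simp only [List.headD_cons]
    rw [ih]
    rfl

theorem okListF_structure (current : List Int) (a b : Int) (ts : List Int) :
    okListF current a b ts = okChain current a b ts :: (okListF current a b ts).tail := by
  cases ts with
  | nil => rfl
  | cons t ts' =>
    rw [okListF_cons, headD_okListF]
    rfl

theorem revfold_eq (current : List Int) (a b : Int) (ts : List Int) :
    ts.reverse.foldl
        (fun ok t => ok ++ [stepSet t ((PySem.List.pyGet? ok (-1)).getD PySem.Set.empty)])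
        [lastSet current (current.length : Int) a b]
      = (okListF current a b ts).reverse := by
  induction ts with
  | nil => rfl
  | cons t ts ih =>
    rw [List.reverse_cons, List.foldl_append, ih, List.foldl_cons, List.foldl_nil]
    rw [okListF_cons, List.reverse_cons]
    congr 3
    rw [PySem.List.pyGet?_neg_one, List.getLast?_reverse]
    rw [okListF_structure current a b ts]
    rfl

theorem greedy_eq (current : List Int) (a b : Int) (ts : List Int) (l c : Int) (s p : List Int)
    (hc : c = 0 ∨ c = 1) (hF : firstSuffix current a b ts l c = some s) :
    ((ts.zip ((okListF current a b ts).tail)).foldl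
      (fun (st : List Int × Int × Int) tn =>
        match ([(0 : Int), 1]).find? (fun r =>
            decide (ruleGet st.2.1 st.2.2 r = tn.1) && PySem.Set.contains tn.2 (st.2.2, r)) with
        | some r => (st.1 ++ [r], st.2.2, r)
        | none => st) (p, l, c)).1 = p ++ s := by
  induction ts generalizing l c s p with
  | nil =>
    rw [show firstSuffix current a b [] l c
        = (if endOK current a b l c = true then some [] else none) from rfl] at hF
    split_ifs at hF with hok
    injection hF with hs
    subst hs
    simp [okListF]

  | cons t ts ih =>
    rw [show (okListF current a b (t :: ts)).tail = okListF current a b ts from rfl]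
    rw [okListF_structure current a b ts, List.zip_cons_cons, List.foldl_cons]
    dsimp only
    rw [show firstSuffix current a b (t :: ts) l c
      = ((if ruleGet l c 0 = t then (firstSuffix current a b ts c 0).map (fun s => 0 :: s)
            else none).or
          (if ruleGet l c 1 = t then (firstSuffix current a b ts c 1).map (fun s => 1 :: s)
            else none)) from rfl] at hF
    by_cases hcase0 : ruleGet l c 0 = t ∧ firstSuffix current a b ts c 0 ≠ none
    · -- the cell value 0 is chosen
      obtain ⟨hrule0, hne0⟩ := hcase0
      obtain ⟨s0, hs0⟩ := Option.ne_none_iff_exists'.mp hne0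
      rw [if_pos hrule0, hs0] at hF
      simp only [Option.map_some, Option.some_or, Option.some.injEq] at hF
      subst hF
      have hcont : PySem.Set.contains (okChain current a b ts) (c, 0) = true :=
        (mem_okChain current a b ts c 0 hc (Or.inl rfl)).mpr
          (by rw [hs0]; exact Option.some_ne_none _)
      rw [List.find?_cons_of_pos (by
        simp only [hrule0, decide_true, hcont, Bool.and_self])]
      rw [ih c 0 s0 (p ++ [0]) (Or.inl rfl) hs0]
      simp
    · -- the cell value 0 is impossible; value 1 is chosen
      have ho0 : (if ruleGet l c 0 = t
          then (firstSuffix current a b ts c 0).map (fun s => 0 :: s) else none) = none := by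
        by_cases hq : ruleGet l c 0 = t
        · rw [if_pos hq, Option.map_eq_none_iff]
          by_contra hne
          exact hcase0 ⟨hq, hne⟩
        · rw [if_neg hq]
      rw [ho0, Option.none_or] at hF
      split_ifs at hF with hrule1
      obtain ⟨s1, hs1, rfl⟩ := Option.map_eq_some_iff.mp hF
      have hcont1 : PySem.Set.contains (okChain current a b ts) (c, 1) = true :=
        (mem_okChain current a b ts c 1 hc (Or.inr rfl)).mpr
          (by rw [hs1]; exact Option.some_ne_none _)
      have hc0 : (decide (ruleGet l c 0 = t)
          && PySem.Set.contains (okChain current a b ts) (c, 0)) = false := by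
        by_cases hq : ruleGet l c 0 = t
        · have hnone0 : firstSuffix current a b ts c 0 = none := by
            by_contra hne
            exact hcase0 ⟨hq, hne⟩
          have hcf : PySem.Set.contains (okChain current a b ts) (c, 0) = false := by
            rw [Bool.eq_false_iff]
            intro hct
            exact absurd ((mem_okChain current a b ts c 0 hc (Or.inl rfl)).mp hct)
              (by simp [hnone0])
          rw [hcf, Bool.and_false]
        · simp [hq]
      rw [List.find?_cons_of_neg (by rw [hc0]; exact Bool.false_ne_true)]
      rw [List.find?_cons_of_pos (by
        simp only [hrule1, decide_true, hcont1, Bool.and_self])]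
      rw [ih c 1 s1 (p ++ [1]) (Or.inr rfl) hs1]
      simp

theorem tryStart_eq (current : List Int) (ts : List Int) (a b : Int)
    (ha : a = 0 ∨ a = 1) (hb : b = 0 ∨ b = 1) :
    tryStart current (current.length : Int) ts a b
      = (firstSuffix current a b ts a b).map (fun s => a :: b :: s) := by
  unfold tryStart
  simp only []
  rw [revfold_eq current a b ts, List.reverse_reverse]
  rw [show (okListF current a b ts).headD PySem.Set.empty = okChain current a b ts from
    headD_okListF current a b ts]
  cases hF : firstSuffix current a b ts a b with
  | none =>
    rw [if_neg]
    · rfl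
    · intro hcon
      exact absurd ((mem_okChain current a b ts a b ha hb).mp hcon) (by simp [hF])
  | some s =>
    rw [if_pos]
    · rw [greedy_eq current a b ts a b s [a, b] hb hF]
      rfl
    · exact (mem_okChain current a b ts a b ha hb).mpr (by simp [hF])

theorem find?_congr' {α : Type} {l : List α} {p q : α → Bool} (h : ∀ x ∈ l, p x = q x) :
    l.find? p = l.find? q := by
  induction l with
  | nil => rfl
  | cons a l ih =>
    rw [List.find?_cons, List.find?_cons, h a (List.mem_cons_self)]
    cases q a with
    | true => rfl
    | false => exact ih (fun x hx => h x (List.mem_cons_of_mem _ hx))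

theorem map_or (o o' : Option (List Int)) (f : List Int → List Int) :
    (o.or o').map f = (o.map f).or (o'.map f) := by
  cases o <;> rfl

theorem find?_allBin_two (k : Nat) (p : List Int → Bool) :
    (allBin (k + 2)).find? p
      = (((allBin k).find? (fun s => p (0 :: 0 :: s))).map (fun s => (0 : Int) :: 0 :: s)).or
        ((((allBin k).find? (fun s => p (0 :: 1 :: s))).map (fun s => (0 : Int) :: 1 :: s)).or
          ((((allBin k).find? (fun s => p (1 :: 0 :: s))).map (fun s => (1 : Int) :: 0 :: s)).or
            (((allBin k).find? (fun s => p (1 :: 1 :: s))).map (fun s => (1 : Int) :: 1 :: s)))) := by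
  rw [show allBin (k + 2)
      = (allBin (k + 1)).map (fun s => 0 :: s) ++ (allBin (k + 1)).map (fun s => 1 :: s) from rfl,
    show allBin (k + 1)
      = (allBin k).map (fun s => 0 :: s) ++ (allBin k).map (fun s => 1 :: s) from rfl]
  rw [List.map_append, List.map_append, List.map_map, List.map_map, List.map_map, List.map_map]
  rw [List.append_assoc]
  rw [List.find?_append, List.find?_append, List.find?_append]
  rw [List.find?_map, List.find?_map, List.find?_map, List.find?_map]
  simp only [Function.comp_def]

theorem mid_eq (current : List Int) (h2 : 2 ≤ current.length) :
    PySem.List.slice current (some 1) (some ((current.length : Int) - 1))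
      = (current.drop 1).take (current.length - 2) := by
  rw [PySem.List.slice_toNat current (by norm_num) (by omega)]
  rw [show ((current.length : Int) - 1).toNat - ((1 : Int)).toNat = current.length - 2 from by
    omega]
  rfl

theorem main_ge2 (current : List Int) (h2 : 2 ≤ current.length) :
    reverse_110 current = reverse_110_alt current := by
  have hk : current.length = (current.length - 2) + 2 := by omega
  set ts := (current.drop 1).take (current.length - 2) with hts
  have hlts : ts.length = current.length - 2 := length_mid current h2
  -- the A side
  have hA : reverse_110 current
      = ((tryStart current (current.length : Int) ts 0 0).or
          ((tryStart current (current.length : Int) ts 0 1).or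
            ((tryStart current (current.length : Int) ts 1 0).or
              (tryStart current (current.length : Int) ts 1 1)))) := by
    rw [show reverse_110 current = backtrack110 current current.length [] 0 from rfl]
    rw [backtrack_eq current current.length [] 0 (by simp) (by simp)]
    simp only [List.nil_append]
    rw [show allBin current.length = allBin ((current.length - 2) + 2) from by rw [← hk]]
    rw [find?_allBin_two]
    have hblock : ∀ a b : Int, (a = 0 ∨ a = 1) → (b = 0 ∨ b = 1) →
        ((allBin (current.length - 2)).find? (fun s => validB current (a :: b :: s))).map
            (fun s => a :: b :: s)
          = tryStart current (current.length : Int) ts a b := by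
      intro a b ha hb
      rw [find?_congr' (fun s hs =>
        valid_iff_goodChain current a b s h2 (by rw [mem_allBin hs]))]
      rw [show allBin (current.length - 2) = allBin ts.length from by rw [hlts]]
      rw [find?_goodChain current a b ts a b]
      rw [tryStart_eq current ts a b ha hb]
    rw [map_or, map_or, map_or]
    have hmapid : ∀ o : Option (List Int), o.map (fun s => s) = o := fun o => by cases o <;> rfl
    simp only [hmapid]
    rw [hblock 0 0 (Or.inl rfl) (Or.inl rfl), hblock 0 1 (Or.inl rfl) (Or.inr rfl),
      hblock 1 0 (Or.inr rfl) (Or.inl rfl), hblock 1 1 (Or.inr rfl) (Or.inr rfl)]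
  -- the B side
  have hB : reverse_110_alt current
      = ((tryStart current (current.length : Int) ts 0 0).or
          ((tryStart current (current.length : Int) ts 0 1).or
            ((tryStart current (current.length : Int) ts 1 0).or
              (tryStart current (current.length : Int) ts 1 1)))) := by
    unfold reverse_110_alt
    simp only []
    rw [if_neg (by omega), if_neg (by omega)]
    rw [mid_eq current h2]
  rw [hA, hB]

theorem case_one (x : Int) : reverse_110 [x] = reverse_110_alt [x] := by
  by_cases hx : x = 0
  · subst hx
    decide
  · have e0 : elt [x] [0] 0 = 0 := by
      simp only [elt, List.length_cons, List.length_nil]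
      decide
    have e1 : elt [x] [1] 0 = 0 := by
      simp only [elt, List.length_cons, List.length_nil]
      decide
    have a0 : applyRule110 [x] [0] = [0] := by
      rw [applyRule110_eq_map]
      norm_num [List.range_one, e0]
    have a1 : applyRule110 [x] [1] = [0] := by
      rw [applyRule110_eq_map]
      norm_num [List.range_one, e1]
    have h0 : ¬ (validB [x] ([] ++ [0]) = true) := by
      simp only [List.nil_append, validB, a0, decide_eq_true_eq]
      simp [hx, eq_comm]
    have h1 : ¬ (validB [x] ([] ++ [1]) = true) := by
      simp only [List.nil_append, validB, a1, decide_eq_true_eq]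
      simp [hx, eq_comm]
    rw [show reverse_110 [x] = backtrack110 [x] 1 [] 0 from rfl]
    rw [backtrack_eq [x] 1 [] 0 (by simp) (by simp)]
    rw [show allBin 1 = [[0], [1]] from rfl]
    rw [List.find?_cons_of_neg (p := fun s => validB [x] ([] ++ s)) (a := [0]) h0]
    rw [List.find?_cons_of_neg (p := fun s => validB [x] ([] ++ s)) (a := [1]) h1]
    rw [show List.find? (fun s => validB [x] ([] ++ s)) [] = none from rfl]
    rw [show reverse_110_alt [x]
        = (if (PySem.List.pyGet? [x] 0).getD 0 = 0 then some [0] else none) from rfl]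
    rw [if_neg (by simpa using hx)]
    rfl

-- ===== VERDICT (by name: the statement is the Claim_ definition above) =====
theorem reverse_110_spec : Claim_equal_reverse_110 := by
  unfold Claim_equal_reverse_110
  intro current _hdom
  unfold Spec_reverse_110
  cases current with
  | nil => decide
  | cons x xs =>
    cases xs with
    | nil => exact case_one x
    | cons y rest => exact main_ge2 (x :: y :: rest) (by simp)
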